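-- pv_equiv track=rewrite | github.com/DragunWF/Competitive-Programming | CodeWars/python/7_kyu/numbers_with_this_digit_inside.py | numbers_with_digit_inside
-- ===== SOURCE A (Python) =====
-- def numbers_with_digit_inside(x: int, d: int) -> list[int]:
--     numbers = []
--     d = str(d)
--     for num in range(1, x + 1):
--         str_num = str(num)
--         if d in str_num:
--             numbers.append(num)
--     sum_of_nums = 0 if not numbers else numbers[0]
--     product_of_nums = 0 if not numbers else numbers[0]
--     for i in range(1, len(numbers)):
--         sum_of_nums += numbers[i]
--         product_of_nums *= numbers[i]
--     return [len(numbers), sum_of_nums, product_of_nums]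
-- ===== SOURCE B (Python) =====
-- def numbers_with_digit_inside(x: int, d: int) -> list[int]:
--     count = 0
--     total = 0
--     prod = 1
--     ds = str(d)
--     for num in range(1, x + 1):
--         if ds in str(num):
--             count += 1
--             total += num
--             prod *= num
--     return [count, total, prod if count else 0]
-- ===== Notes on version B (the rewrite author's own statement) =====
-- stated objective: simpler
-- what changed: B makes a single pass keeping count/total/product accumulators instead of building an intermediate list of matches and re-scanning it with a second index loop seeded from numbers[0].
import Mathlib
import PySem

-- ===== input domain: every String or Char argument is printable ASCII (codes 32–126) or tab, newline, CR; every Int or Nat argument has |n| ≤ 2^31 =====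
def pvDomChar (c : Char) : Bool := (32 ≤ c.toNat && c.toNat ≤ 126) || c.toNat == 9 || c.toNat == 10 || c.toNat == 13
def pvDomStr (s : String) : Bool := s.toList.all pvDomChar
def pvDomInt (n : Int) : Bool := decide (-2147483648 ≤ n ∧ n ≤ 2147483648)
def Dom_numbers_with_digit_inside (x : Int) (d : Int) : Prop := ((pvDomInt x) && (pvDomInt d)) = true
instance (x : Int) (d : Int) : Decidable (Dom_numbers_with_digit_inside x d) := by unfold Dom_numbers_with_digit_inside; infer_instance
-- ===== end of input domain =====

-- B replaces A's intermediate match list and second index loop by a single pass with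
-- count/total/product accumulators (objective: simpler; same value everywhere).

-- ===== PORT A =====
def numbers_with_digit_inside (x : Int) (d : Int) : List Int :=
  let ds := PySem.Int.toStr d
  let numbers := (PySem.List.pyRange 1 (x + 1) 1).foldl
    (fun acc num =>
      if PySem.Str.isIn ds (PySem.Int.toStr num) then acc ++ [num] else acc) []
  let sum0 : Int := if numbers = [] then 0 else PySem.List.pyGetD numbers 0 0
  let prod0 : Int := if numbers = [] then 0 else PySem.List.pyGetD numbers 0 0
  let sp := (PySem.List.pyRange 1 (numbers.length : Int) 1).foldl
    (fun (acc : Int × Int) i =>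
      (acc.1 + PySem.List.pyGetD numbers i 0, acc.2 * PySem.List.pyGetD numbers i 0))
    (sum0, prod0)
  [(numbers.length : Int), sp.1, sp.2]

-- ===== PORT B =====
def numbers_with_digit_inside_alt (x : Int) (d : Int) : List Int :=
  let ds := PySem.Int.toStr d
  let s := (PySem.List.pyRange 1 (x + 1) 1).foldl
    (fun (acc : Int × Int × Int) num =>
      if PySem.Str.isIn ds (PySem.Int.toStr num) then
        (acc.1 + 1, acc.2.1 + num, acc.2.2 * num)
      else acc)
    (0, 0, 1)
  [s.1, s.2.1, if s.1 = 0 then 0 else s.2.2]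

-- ===== PRECONDITION & SPEC =====
def Spec_numbers_with_digit_inside (x : Int) (d : Int) (out : List Int) : Prop := out = numbers_with_digit_inside_alt x d
instance (x : Int) (d : Int) (out : List Int) : Decidable (Spec_numbers_with_digit_inside x d out) := by unfold Spec_numbers_with_digit_inside; infer_instance

-- ===== CLAIM (what is proved, stated in full; the proofs are below) =====
def Claim_equal_numbers_with_digit_inside : Prop := ∀ (x : Int) (d : Int), Dom_numbers_with_digit_inside x d → Spec_numbers_with_digit_inside x d (numbers_with_digit_inside x d)

-- ===== LEMMAS AND PROOFS =====

-- A's second loop over an arbitrary list: adds the sum and multiplies in the product.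
theorem sumprod_foldl (t : List Int) (s p : Int) :
    t.foldl (fun (acc : Int × Int) v => (acc.1 + v, acc.2 * v)) (s, p)
      = (s + t.sum, p * t.prod) := by
  induction t generalizing s p with
  | nil => simp
  | cons a t ih => simp [List.foldl, ih, mul_assoc, add_assoc]

-- B's single pass over an arbitrary list: counts, sums and multiplies the matches.
theorem triple_foldl (q : Int → Bool) (ys : List Int) (c s p : Int) :
    ys.foldl (fun (acc : Int × Int × Int) num =>
        if q num then (acc.1 + 1, acc.2.1 + num, acc.2.2 * num) else acc) (c, s, p)
      = (c + ((ys.filter q).length : Int), s + (ys.filter q).sum, p * (ys.filter q).prod) := by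
  induction ys generalizing c s p with
  | nil => simp
  | cons a ys ih =>
    by_cases h : q a = true
    · simp [List.foldl, h, ih]
      exact ⟨by ring, by ring, by ring⟩
    · simp [List.foldl, h, ih]

-- Both shapes, abstracted over the membership test and the enumerated range.
theorem ab_eq (q : Int → Bool) (ys : List Int) :
    (let numbers := ys.foldl (fun acc num => if q num then acc ++ [num] else acc) []
     let sum0 : Int := if numbers = [] then 0 else PySem.List.pyGetD numbers 0 0
     let prod0 : Int := if numbers = [] then 0 else PySem.List.pyGetD numbers 0 0
     let sp := (PySem.List.pyRange 1 (numbers.length : Int) 1).foldl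
       (fun (acc : Int × Int) i =>
         (acc.1 + PySem.List.pyGetD numbers i 0, acc.2 * PySem.List.pyGetD numbers i 0))
       (sum0, prod0)
     [(numbers.length : Int), sp.1, sp.2])
    =
    (let s := ys.foldl (fun (acc : Int × Int × Int) num =>
        if q num then (acc.1 + 1, acc.2.1 + num, acc.2.2 * num) else acc) (0, 0, 1)
     [s.1, s.2.1, if s.1 = 0 then 0 else s.2.2]) := by
  simp only [PySem.List.foldl_append_if_eq_filter q ys [], List.nil_append,
    triple_foldl q ys 0 0 1]
  have hloop := PySem.List.foldl_pyRange_pyGetD' (xs := ys.filter q) (d := (0 : Int))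
    (f := fun (acc : Int × Int) v => (acc.1 + v, acc.2 * v))
    (init := ((if ys.filter q = [] then 0 else PySem.List.pyGetD (ys.filter q) 0 0),
              (if ys.filter q = [] then 0 else PySem.List.pyGetD (ys.filter q) 0 0)))
    (a := 1) (by norm_num)
  simp only [hloop]
  cases hl : ys.filter q with
  | nil => simp
  | cons a t =>
    have hne : (a :: t : List Int) ≠ [] := by simp
    simp only [hne, sumprod_foldl]
    have h0 : PySem.List.pyGetD (a :: t) 0 0 = a := by
      simp [PySem.List.pyGetD]
    simp [h0, List.sum_cons, List.prod_cons]
    intro h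
    omega

theorem agree (x d : Int) :
    numbers_with_digit_inside x d = numbers_with_digit_inside_alt x d :=
  ab_eq (fun num => PySem.Str.isIn (PySem.Int.toStr d) (PySem.Int.toStr num))
    (PySem.List.pyRange 1 (x + 1) 1)

-- ===== VERDICT (by name: the statement is the Claim_ definition above) =====
theorem numbers_with_digit_inside_spec : Claim_equal_numbers_with_digit_inside := by
  intro x d _
  exact agree x d
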